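-- pv_equiv track=rewrite | github.com/excetra-product-lab/chat_with_docs | backend/app/services/document_transformers/document_transformer.py | _clean_text_content
-- ===== SOURCE A (Python) =====
-- def _clean_text_content(text: str) -> str:
--     """Clean text content by removing unwanted characters and normalizing."""
--     if not text:
--         return text
--
--     # Remove excessive whitespace
--     lines = text.split("\n")
--     cleaned_lines = []
--
--     for line in lines:
--         # Strip whitespace from each line
--         cleaned_line = line.strip()
--
--         # Skip empty lines that are just whitespace
--         if cleaned_line:
--             # Replace multiple spaces with single space
--             cleaned_line = " ".join(cleaned_line.split())
--             cleaned_lines.append(cleaned_line)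
--         elif (
--             cleaned_lines and cleaned_lines[-1]
--         ):  # Keep single empty lines between content
--             cleaned_lines.append("")
--
--     # Join lines back together
--     cleaned_text = "\n".join(cleaned_lines)
--
--     # Remove excessive newlines (more than 2 consecutive)
--     while "\n\n\n" in cleaned_text:
--         cleaned_text = cleaned_text.replace("\n\n\n", "\n\n")
--
--     # Remove common unwanted characters
--     unwanted_chars = [
--         "\r",
--         "\x00",
--         "\ufffd",
--     ]  # carriage return, null, replacement char
--     for char in unwanted_chars:
--         cleaned_text = cleaned_text.replace(char, "")
--
--     return cleaned_text.strip()
-- ===== SOURCE B (Python) =====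
-- from itertools import groupby
--
--
-- def _clean_text_content(text: str) -> str:
--     # Normalize each line to its whitespace-collapsed form ("" marks a blank line).
--     normalized = [" ".join(line.split()) for line in text.split("\n")]
--
--     # Group consecutive equal-blankness lines: emit non-blank runs whole,
--     # collapse each blank run to a single "" (dropped while output is empty).
--     parts = []
--     for is_blank, run in groupby(normalized, key=lambda s: s == ""):
--         if not is_blank:
--             parts.extend(run)
--         elif parts:
--             parts.append("")
--
--     cleaned = "\n".join(parts)
--     for ch in "\r\x00\ufffd":
--         cleaned = cleaned.replace(ch, "")
--     return cleaned.strip()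
-- ===== Notes on version B (the rewrite author's own statement) =====
-- stated objective: alternative
-- what changed: B normalizes every line once by splitting it into words and rejoining with single spaces, then replaces A's stateful line loop (strip, emptiness test, last-element check) and A's whole-string triple-newline replace loop by a single itertools.groupby pass over the normalized lines that emits non-blank runs whole and collapses each blank run to one separator (dropped while the output is still empty).
import Mathlib
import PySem

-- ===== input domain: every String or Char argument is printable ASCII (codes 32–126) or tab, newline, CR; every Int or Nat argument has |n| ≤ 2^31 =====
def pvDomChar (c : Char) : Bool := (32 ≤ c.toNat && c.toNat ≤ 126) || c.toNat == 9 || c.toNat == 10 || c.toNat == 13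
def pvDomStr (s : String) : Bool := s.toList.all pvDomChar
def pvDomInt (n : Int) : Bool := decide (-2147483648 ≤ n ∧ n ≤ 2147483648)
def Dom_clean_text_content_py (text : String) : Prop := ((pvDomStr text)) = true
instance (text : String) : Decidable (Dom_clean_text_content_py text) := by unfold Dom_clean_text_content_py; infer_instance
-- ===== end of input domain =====

-- B replaces A's stateful line loop (strip + last-element test) and A's `while "\n\n\n" in …`
-- replace loop by a single groupby pass over whitespace-normalized lines; same return value.

-- ===== PORT A =====
-- the `while "\n\n\n" in cleaned_text:` loop of A; the fuel argument only makes the recursion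
-- total in Lean (each iteration shortens the string, so length + 1 iterations always suffice)
def pvCollapseNl : Nat → String → String
  | 0, s => s
  | (n+1), s =>
      if PySem.Str.isIn "\n\n\n" s then pvCollapseNl n (PySem.Str.replace s "\n\n\n" "\n\n")
      else s

def clean_text_content_py (text : String) : String :=
  if text = "" then text
  else
    let lines := (PySem.Str.split? text "\n").getD []
    let cleaned_lines := lines.foldl (fun acc line =>
      let cleaned_line := PySem.Str.strip line
      if cleaned_line ≠ "" then
        acc ++ [PySem.Str.join " " (PySem.Str.split₀ cleaned_line)]
      else if acc ≠ [] ∧ acc.getLast?.getD "" ≠ "" then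
        acc ++ [""]
      else acc) []
    let cleaned_text := PySem.Str.join "\n" cleaned_lines
    let cleaned_text := pvCollapseNl (cleaned_text.toList.length + 1) cleaned_text
    let cleaned_text := ["\r", "\x00", "\uFFFD"].foldl
      (fun s ch => PySem.Str.replace s ch "") cleaned_text
    PySem.Str.strip cleaned_text

-- ===== PORT B =====
-- itertools.groupby over the normalized lines, key = (s == ""): maximal runs of equal
-- key, built by a structural right fold (prepend each element to the first run when
-- its key matches, else open a new run)
def pvGroupAdd (k : Bool) (x : String) : List (Bool × List String) → List (Bool × List String)
  | [] => [(k, [x])]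
  | (k', run) :: rest =>
      if k == k' then (k, x :: run) :: rest
      else (k, [x]) :: (k', run) :: rest

def pvGroupRuns : List String → List (Bool × List String)
  | [] => []
  | x :: xs => pvGroupAdd (x == "") x (pvGroupRuns xs)

def clean_text_content_py_alt (text : String) : String :=
  let normalized := ((PySem.Str.split? text "\n").getD []).map
    (fun line => PySem.Str.join " " (PySem.Str.split₀ line))
  let parts := (pvGroupRuns normalized).foldl (fun parts kr =>
      if kr.1 = false then parts ++ kr.2
      else if parts ≠ [] then parts ++ [""]
      else parts) []
  let cleaned := PySem.Str.join "\n" parts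
  let cleaned := ("\r\x00\uFFFD".toList).foldl
    (fun s c => PySem.Str.replace s (String.ofList [c]) "") cleaned
  PySem.Str.strip cleaned

-- ===== PRECONDITION & SPEC =====
def Spec_clean_text_content_py (text : String) (out : String) : Prop := out = clean_text_content_py_alt text
instance (text : String) (out : String) : Decidable (Spec_clean_text_content_py text out) := by unfold Spec_clean_text_content_py; infer_instance

-- ===== CLAIM (what is proved, stated in full; the proofs are below) =====
def Claim_equal_clean_text_content_py : Prop := ∀ (text : String), Dom_clean_text_content_py text → Spec_clean_text_content_py text (clean_text_content_py text)

-- ===== LEMMAS AND PROOFS =====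

-- ---- facts about Python's str.split() (PySem.Chars.split₀.go) ----

theorem pv_go_lstrip (s : List Char) (acc : List (List Char)) :
    PySem.Chars.split₀.go (List.dropWhile PySem.Chars.isspace s) [] acc
      = PySem.Chars.split₀.go s [] acc := by
  induction s generalizing acc with
  | nil => rfl
  | cons c s ih =>
    by_cases h : PySem.Chars.isspace c
    · simp [h, PySem.Chars.split₀.go, ih]
    · simp [h]

theorem pv_go_spaces (ws : List Char) (hws : ∀ c ∈ ws, PySem.Chars.isspace c)
    (s : List Char) (cur : List Char) (acc : List (List Char)) :
    PySem.Chars.split₀.go (s ++ ws) cur acc = PySem.Chars.split₀.go s cur acc := by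
  induction s generalizing cur acc with
  | nil =>
    simp only [List.nil_append]
    induction ws generalizing cur acc with
    | nil => rfl
    | cons w ws ihw =>
      have hw : PySem.Chars.isspace w := hws w (by simp)
      have hws' : ∀ c ∈ ws, PySem.Chars.isspace c := fun c hc => hws c (by simp [hc])
      by_cases hc : cur = []
      · simp [PySem.Chars.split₀.go, hw, hc, ihw hws']
      · simp [PySem.Chars.split₀.go, hw, hc, ihw hws']
  | cons c s ih =>
    by_cases h : PySem.Chars.isspace c <;> by_cases hc : cur = [] <;>
      simp [PySem.Chars.split₀.go, h, hc, ih]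

theorem pv_go_ne_nil (s cur : List Char) (acc : List (List Char))
    (h : cur ≠ [] ∨ acc ≠ [] ∨ ∃ c ∈ s, ¬ PySem.Chars.isspace c) :
    PySem.Chars.split₀.go s cur acc ≠ [] := by
  induction s generalizing cur acc with
  | nil =>
    rcases h with h | h | h
    · simp [PySem.Chars.split₀.go, h]
    · by_cases hc : cur = [] <;> simp [PySem.Chars.split₀.go, hc, h]
    · simp at h
  | cons c s ih =>
    by_cases hsp : PySem.Chars.isspace c
    · by_cases hc : cur = []
      · refine hc ▸ ?_
        simp only [PySem.Chars.split₀.go, hsp, List.isEmpty_nil, if_true]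
        apply ih
        rcases h with h | h | h
        · exact absurd hc h
        · exact Or.inr (Or.inl h)
        · rcases h with ⟨d, hd, hdn⟩
          rcases (List.mem_cons.mp hd) with rfl | hd'
          · exact absurd hsp hdn
          · exact Or.inr (Or.inr ⟨d, hd', hdn⟩)
      · simp only [PySem.Chars.split₀.go, hsp, if_true, List.isEmpty_iff, hc]
        exact ih [] _ (Or.inr (Or.inl (by simp)))
    · simp only [PySem.Chars.split₀.go, hsp]
      exact ih _ _ (Or.inl (by simp))

theorem pv_go_words (s cur : List Char) (acc : List (List Char))
    (hacc : ∀ w ∈ acc, w ≠ [] ∧ ∀ c ∈ w, ¬ PySem.Chars.isspace c)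
    (hcur : ∀ c ∈ cur, ¬ PySem.Chars.isspace c) :
    ∀ w ∈ PySem.Chars.split₀.go s cur acc, w ≠ [] ∧ ∀ c ∈ w, ¬ PySem.Chars.isspace c := by
  induction s generalizing cur acc with
  | nil =>
    intro w hw
    by_cases hc : cur = []
    · simp [PySem.Chars.split₀.go, hc] at hw
      exact hacc _ hw
    · simp [PySem.Chars.split₀.go, hc] at hw
      rcases hw with hw | hw
      · exact hacc _ hw
      · subst hw
        exact ⟨by simpa using hc, fun c hc' => hcur c (by simpa using hc')⟩
  | cons c s ih =>
    intro w hw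
    by_cases hsp : PySem.Chars.isspace c
    · by_cases hc : cur = []
      · subst hc
        simp only [PySem.Chars.split₀.go, hsp, if_true, List.isEmpty_nil] at hw
        exact ih [] acc hacc (by simp) w hw
      · simp only [PySem.Chars.split₀.go, hsp, if_true, List.isEmpty_iff, hc] at hw
        refine ih [] _ ?_ (by simp) w hw
        intro v hv
        rcases List.mem_cons.mp hv with rfl | hv'
        · exact ⟨by simpa using hc, fun d hd => hcur d (by simpa using hd)⟩
        · exact hacc _ hv'
    · simp only [PySem.Chars.split₀.go, hsp] at hw
      refine ih _ _ hacc ?_ w hw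
      intro d hd
      rcases List.mem_cons.mp hd with rfl | hd'
      · exact hsp
      · exact hcur d hd'

-- Python's s.split() ignores leading/trailing whitespace, so split() ∘ strip = split()
theorem pv_split₀_strip (s : List Char) :
    PySem.Chars.split₀ (PySem.Chars.strip s) = PySem.Chars.split₀ s := by
  unfold PySem.Chars.split₀ PySem.Chars.strip PySem.Chars.rstrip PySem.Chars.lstrip
  set p := PySem.Chars.isspace
  set t := List.dropWhile p s with ht
  have hsplit : t = (List.dropWhile p t.reverse).reverse ++ (List.takeWhile p t.reverse).reverse := by
    conv_lhs => rw [← t.reverse_reverse, ← List.takeWhile_append_dropWhile (p := p) (l := t.reverse)]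
    rw [List.reverse_append]
  have hws : ∀ c ∈ (List.takeWhile p t.reverse).reverse, p c := by
    intro c hc
    exact List.mem_takeWhile_imp (by simpa using hc)
  calc PySem.Chars.split₀.go (List.dropWhile p t.reverse).reverse [] []
      = PySem.Chars.split₀.go ((List.dropWhile p t.reverse).reverse ++ (List.takeWhile p t.reverse).reverse) [] [] :=
        (pv_go_spaces _ hws _ [] []).symm
    _ = PySem.Chars.split₀.go t [] [] := by rw [← hsplit]
    _ = PySem.Chars.split₀.go s [] [] := pv_go_lstrip s []

theorem pv_strip_nil_iff (s : List Char) :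
    PySem.Chars.strip s = [] ↔ ∀ c ∈ s, PySem.Chars.isspace c := by
  unfold PySem.Chars.strip PySem.Chars.rstrip PySem.Chars.lstrip
  set p := PySem.Chars.isspace
  set t := List.dropWhile p s with ht
  have h1 : (List.dropWhile p t.reverse).reverse = [] ↔ ∀ c ∈ t, p c := by
    rw [List.reverse_eq_nil_iff, List.dropWhile_eq_nil_iff]
    simp
  rw [h1]
  constructor
  · intro h c hc
    have htnil : t = [] := by
      by_contra h0
      have h0' : List.dropWhile p s ≠ [] := by rw [← ht]; exact h0
      have h2 := List.head_dropWhile_not p h0'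
      have h3 : (List.dropWhile p s).head h0' ∈ t := by rw [ht]; exact List.head_mem h0'
      rw [h _ h3] at h2
      simp at h2
    rw [List.dropWhile_eq_nil_iff] at htnil
    exact htnil c hc
  · intro h c hc
    exact h c (List.dropWhile_sublist (l := s) (p := p) |>.subset hc)

theorem pv_split₀_nil_iff (s : List Char) :
    PySem.Chars.split₀ s = [] ↔ ∀ c ∈ s, PySem.Chars.isspace c := by
  constructor
  · intro h
    by_contra hn
    push Not at hn
    obtain ⟨c, hc, hcn⟩ := hn
    exact pv_go_ne_nil s [] [] (Or.inr (Or.inr ⟨c, hc, by simpa using hcn⟩)) h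
  · intro h
    have := pv_go_spaces s h [] [] []
    simpa [PySem.Chars.split₀] using this

-- ---- the common "blank separator" state machine both loops compute ----

def pvG : Bool → List String → List String
  | _, [] => []
  | b, n :: ns =>
      if n = "" then (if b then "" :: pvG false ns else pvG false ns)
      else n :: pvG true ns

theorem pvG_irrel (b₁ b₂ : Bool) (ns : List String) (h : ns.head?.getD "x" ≠ "") :
    pvG b₁ ns = pvG b₂ ns := by
  cases ns with
  | nil => rfl
  | cons n ns => simp at h; simp [pvG, h]

theorem pvG_nonblank_run (run rest : List String) (x : String) (hx : x ≠ "")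
    (hrun : ∀ y ∈ run, y ≠ "") (b : Bool) :
    pvG b (x :: (run ++ rest)) = (x :: run) ++ pvG true rest := by
  induction run generalizing x b with
  | nil => simp [pvG, hx]
  | cons y run ih =>
    have hy : y ≠ "" := hrun y (by simp)
    have hrun' : ∀ z ∈ run, z ≠ "" := fun z hz => hrun z (by simp [hz])
    simp only [List.cons_append]
    have h1 : pvG b (x :: y :: (run ++ rest)) = x :: pvG true (y :: (run ++ rest)) := by
      rw [pvG, if_neg hx]
    rw [h1, ih y hy hrun' true]
    simp

theorem pvG_blank_skip (run rest : List String) (hrun : ∀ y ∈ run, y = "") :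
    pvG false (run ++ rest) = pvG false rest := by
  induction run with
  | nil => rfl
  | cons y run ih =>
    have hy : y = "" := hrun y (by simp)
    subst hy
    have h1 : pvG false ("" :: (run ++ rest)) = pvG false (run ++ rest) := by
      rw [pvG]; simp
    rw [List.cons_append, h1, ih (fun z hz => hrun z (by simp [hz]))]

-- A's loop over the lines computes pvG
theorem pv_foldA (ns : List String) (acc : List String) :
    ns.foldl (fun acc n =>
      if n ≠ "" then acc ++ [n]
      else if acc ≠ [] ∧ acc.getLast?.getD "" ≠ "" then acc ++ [""]
      else acc) acc
    = acc ++ pvG (decide (acc.getLast?.getD "" ≠ "")) ns := by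
  induction ns generalizing acc with
  | nil => simp [pvG]
  | cons n ns ih =>
    simp only [List.foldl_cons]
    by_cases hn : n = ""
    · subst hn
      by_cases hb : acc.getLast?.getD "" ≠ ""
      · have hne : acc ≠ [] := by rintro rfl; simp at hb
        have hstep : (if ("" : String) ≠ "" then acc ++ [""]
            else if acc ≠ [] ∧ acc.getLast?.getD "" ≠ "" then acc ++ [""] else acc) = acc ++ [""] := by
          rw [if_neg (by simp), if_pos ⟨hne, hb⟩]
        rw [hstep, ih]
        have hlast : (acc ++ [""]).getLast?.getD "" = "" := by simp
        rw [hlast]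
        have h2 : pvG (decide (acc.getLast?.getD "" ≠ "")) ("" :: ns) = "" :: pvG false ns := by
          rw [pvG]; simp [hb]
        rw [h2]
        simp
      · have hstep : (if ("" : String) ≠ "" then acc ++ [""]
            else if acc ≠ [] ∧ acc.getLast?.getD "" ≠ "" then acc ++ [""] else acc) = acc := by
          rw [if_neg (by simp), if_neg (by tauto)]
        have hb' : acc.getLast?.getD "" = "" := not_ne_iff.mp hb
        rw [hstep, ih, hb']
        simp [pvG]
    · have hstep : (if n ≠ "" then acc ++ [n]
          else if acc ≠ [] ∧ acc.getLast?.getD "" ≠ "" then acc ++ [""] else acc) = acc ++ [n] := by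
        rw [if_pos hn]
      rw [hstep, ih]
      have hlast : (acc ++ [n]).getLast?.getD "" = n := by simp
      rw [hlast]
      have h2 : pvG (decide (acc.getLast?.getD "" ≠ "")) (n :: ns) = n :: pvG true ns := by
        rw [pvG]; simp [hn]
      rw [h2]
      simp [hn]

theorem pv_dropWhile_head_ne (p : String → Bool) (hp : ∀ y, p y = false → y ≠ "")
    (xs : List String) : (xs.dropWhile p).head?.getD "x" ≠ "" := by
  induction xs with
  | nil => simp
  | cons y ys ih =>
    by_cases hy : p y = true
    · simpa [List.dropWhile_cons, hy] using ih
    · simp only [List.dropWhile_cons, Bool.not_eq_true] at hy ⊢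
      rw [hy]
      simpa using hp y hy

-- the right-fold groupby satisfies the usual span equation
theorem pvGroupRuns_cons (x : String) (xs : List String) :
    pvGroupRuns (x :: xs)
      = ((x == ""), x :: xs.takeWhile (fun y => (y == "") == (x == ""))) ::
        pvGroupRuns (xs.dropWhile (fun y => (y == "") == (x == ""))) := by
  induction xs generalizing x with
  | nil => rfl
  | cons y ys ih =>
    show pvGroupAdd (x == "") x (pvGroupRuns (y :: ys)) = _
    rw [ih y, pvGroupAdd]
    by_cases h : ((x == "") : Bool) = ((y == "") : Bool)
    · have hfun : (fun z : String => (z == "") == (x == ""))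
          = (fun z : String => (z == "") == (y == "")) := by
        funext z; rw [h]
      rw [hfun, List.takeWhile_cons, List.dropWhile_cons]
      have hpy : (((y == "") == (y == "")) : Bool) = true := by simp
      rw [hpy]
      simp only [if_true]
      rw [if_pos (by rw [h]; simp), h]
    · have hpy : (((y == "") == (x == "")) : Bool) = false := by
        cases hxk : ((x == "") : Bool) <;> cases hyk : ((y == "") : Bool) <;>
          simp_all
      rw [List.takeWhile_cons, List.dropWhile_cons, hpy]
      simp only [Bool.false_eq_true, if_false]
      rw [if_neg (by simp [h]), ih y]

-- B's loop over the groupby runs computes pvG too (induction on a length bound,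
-- one maximal run per step)
theorem pv_foldB_aux (n : Nat) : ∀ (ns : List String), ns.length ≤ n →
    ∀ parts : List String,
    (pvGroupRuns ns).foldl (fun parts kr =>
      if kr.1 = false then parts ++ kr.2
      else if parts ≠ [] then parts ++ [""]
      else parts) parts
    = parts ++ pvG (decide (parts ≠ [])) ns := by
  induction n with
  | zero =>
    intro ns hlen parts
    have hns : ns = [] := by cases ns with
      | nil => rfl
      | cons a l => simp at hlen
    subst hns
    simp [pvGroupRuns, pvG]
  | succ n ihn =>
    intro ns hlen parts
    cases ns with
    | nil => simp [pvGroupRuns, pvG]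
    | cons x xs =>
    have hxslen : xs.length ≤ n := by simp at hlen; omega
    have ih : ∀ parts : List String,
        (pvGroupRuns (xs.dropWhile (fun y => (y == "") == (x == "")))).foldl (fun parts kr =>
          if kr.1 = false then parts ++ kr.2
          else if parts ≠ [] then parts ++ [""]
          else parts) parts
        = parts ++ pvG (decide (parts ≠ []))
            (xs.dropWhile (fun y => (y == "") == (x == ""))) := by
      intro parts
      exact ihn _ (le_trans (List.length_dropWhile_le _ xs) hxslen) parts
    rw [pvGroupRuns_cons]
    by_cases hx : x = ""
    · subst hx
      have hrun : ∀ y ∈ xs.takeWhile (fun y => (y == "") == ("" == "")), y = "" := by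
        intro y hy
        have := List.mem_takeWhile_imp hy
        simpa using this
      have hrest : (xs.dropWhile (fun y => (y == "") == ("" == ""))).head?.getD "x" ≠ "" :=
        pv_dropWhile_head_ne _ (by intro y hy; simpa using hy) xs
      have hsplit : ∀ b : Bool,
          pvG false xs = pvG b (xs.dropWhile (fun y => (y == "") == ("" == ""))) := by
        intro b
        conv_lhs => rw [← List.takeWhile_append_dropWhile
          (p := fun y => (y == "") == ("" == "")) (l := xs)]
        rw [pvG_blank_skip _ _ hrun]
        exact pvG_irrel _ _ _ hrest
      by_cases hp : parts = []
      · subst hp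
        show List.foldl _ ([] : List String)
          (pvGroupRuns (xs.dropWhile (fun y => (y == "") == ("" == "")))) = _
        rw [ih]
        have h2 : pvG (decide (([] : List String) ≠ [])) ("" :: xs) = pvG false xs := by
          rw [pvG]; simp
        rw [h2, hsplit (decide (([] : List String) ≠ []))]
      · show List.foldl _ (if parts ≠ [] then parts ++ [""] else parts)
          (pvGroupRuns (xs.dropWhile (fun y => (y == "") == ("" == "")))) = _
        rw [if_pos hp, ih]
        have h2 : pvG (decide (parts ≠ [])) ("" :: xs) = "" :: pvG false xs := by
          rw [pvG]; simp [hp]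
        rw [h2, hsplit (decide ((parts ++ [""]) ≠ []))]
        simp
    · have hrun : ∀ y ∈ xs.takeWhile (fun y => (y == "") == (x == "")), y ≠ "" := by
        intro y hy
        have := List.mem_takeWhile_imp hy
        simp [hx] at this
        exact this
      have hkx : ((x == "") : Bool) = false := by simp [hx]
      show List.foldl _
          (if ((x == "") : Bool) = false then
            parts ++ (x :: xs.takeWhile (fun y => (y == "") == (x == "")))
          else if parts ≠ [] then parts ++ [""] else parts)
          (pvGroupRuns (xs.dropWhile (fun y => (y == "") == (x == "")))) = _
      rw [if_pos hkx, ih]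
      have hb : (decide ((parts ++ (x :: xs.takeWhile (fun y => (y == "") == (x == "")))) ≠ [])) = true := by
        simp
      rw [hb]
      conv_rhs => rw [← List.takeWhile_append_dropWhile
        (p := fun y => (y == "") == (x == "")) (l := xs)]
      rw [pvG_nonblank_run _ _ x hx hrun]
      simp

theorem pv_foldB (ns : List String) (parts : List String) :
    (pvGroupRuns ns).foldl (fun parts kr =>
      if kr.1 = false then parts ++ kr.2
      else if parts ≠ [] then parts ++ [""]
      else parts) parts
    = parts ++ pvG (decide (parts ≠ [])) ns :=
  pv_foldB_aux ns.length ns le_rfl parts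

-- ---- invariants of the produced line list ----

theorem pv_intercalate_cc (s a b : List Char) (L : List (List Char)) :
    List.intercalate s (a :: b :: L) = a ++ s ++ List.intercalate s (b :: L) := by
  simp [List.intercalate, List.intersperse]

theorem pv_intercalate_single (s a : List Char) : List.intercalate s [a] = a := by
  simp [List.intercalate]

theorem pv_mem_intercalate (s : List Char) (ws : List (List Char)) (c : Char)
    (h : c ∈ List.intercalate s ws) : c ∈ s ∨ ∃ w ∈ ws, c ∈ w := by
  induction ws with
  | nil => simp [List.intercalate] at h
  | cons a ws ih =>
    cases ws with
    | nil =>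
      rw [pv_intercalate_single] at h
      exact Or.inr ⟨a, by simp, h⟩
    | cons b L =>
      rw [pv_intercalate_cc] at h
      rcases List.mem_append.mp h with h1 | h1
      · rcases List.mem_append.mp h1 with h2 | h2
        · exact Or.inr ⟨a, by simp, h2⟩
        · exact Or.inl h2
      · rcases ih h1 with h2 | ⟨w, hw, hcw⟩
        · exact Or.inl h2
        · exact Or.inr ⟨w, by simp [hw], hcw⟩

theorem pv_join_ne_nil (s : List Char) (a : List Char) (ws : List (List Char))
    (ha : a ≠ []) : List.intercalate s (a :: ws) ≠ [] := by
  cases ws with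
  | nil => rw [pv_intercalate_single]; exact ha
  | cons b L => rw [pv_intercalate_cc]; simp [ha]

theorem pvG_mem : ∀ (b : Bool) (ns : List String) (x : String),
    x ∈ pvG b ns → x = "" ∨ x ∈ ns := by
  intro b ns
  induction ns generalizing b with
  | nil => intro x hx; simp [pvG] at hx
  | cons n ns ih =>
    intro x hx
    by_cases hn : n = ""
    · subst hn
      cases b with
      | false =>
        rw [pvG, if_pos rfl] at hx
        simp only [Bool.false_eq_true, if_false] at hx
        rcases ih false x hx with h | h
        · exact Or.inl h
        · exact Or.inr (by simp [h])
      | true =>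
        rw [pvG, if_pos rfl] at hx
        simp only [if_true] at hx
        rcases List.mem_cons.mp hx with h | h
        · exact Or.inl h
        · rcases ih false x h with h2 | h2
          · exact Or.inl h2
          · exact Or.inr (by simp [h2])
    · rw [pvG, if_neg hn] at hx
      rcases List.mem_cons.mp hx with h | h
      · exact Or.inr (by simp [h])
      · rcases ih true x h with h2 | h2
        · exact Or.inl h2
        · exact Or.inr (by simp [h2])

theorem pvG_head_false : ∀ (ns : List String) (y : String),
    (pvG false ns).head? = some y → y ≠ "" := by
  intro ns
  induction ns with
  | nil => intro y hy; simp [pvG] at hy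
  | cons n ns ih =>
    intro y hy
    by_cases hn : n = ""
    · subst hn
      rw [pvG, if_pos rfl] at hy
      simp only [Bool.false_eq_true, if_false] at hy
      exact ih y hy
    · rw [pvG, if_neg hn] at hy
      simp at hy
      exact hy ▸ hn

theorem pvG_chain : ∀ (b : Bool) (ns : List String),
    List.IsChain (fun a b => a ≠ "" ∨ b ≠ "") (pvG b ns) := by
  intro b ns
  induction ns generalizing b with
  | nil => simp [pvG]
  | cons n ns ih =>
    by_cases hn : n = ""
    · subst hn
      cases b with
      | false =>
        rw [pvG, if_pos rfl]
        simpa using ih false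
      | true =>
        rw [pvG, if_pos rfl]
        simp only [if_true]
        rw [List.isChain_cons]
        exact ⟨fun y hy => Or.inr (pvG_head_false ns y hy), ih false⟩
    · rw [pvG, if_neg hn]
      rw [List.isChain_cons]
      exact ⟨fun y _ => Or.inl hn, ih true⟩

-- ---- no "\n\n\n" in the join ----

theorem pv_infix_skip (a t : List Char) (ha : '\n' ∉ a)
    (h : ['\n','\n','\n'] <:+: a ++ t) : ['\n','\n','\n'] <:+: t := by
  induction a with
  | nil => simpa using h
  | cons c a ih =>
    rw [List.cons_append, List.infix_cons_iff] at h
    rcases h with h | h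
    · rw [List.cons_prefix_cons] at h
      simp at ha
      exact absurd h.1.symm (fun hh => ha.1 hh.symm)
    · exact ih (by simp at ha; exact ha.2) h

theorem pv_join_noTriple (L : List (List Char))
    (hL : ∀ x ∈ L, '\n' ∉ x)
    (hC : List.IsChain (fun a b => a ≠ [] ∨ b ≠ []) L) :
    ¬ (['\n','\n','\n'] <:+: List.intercalate ['\n'] L)
      ∧ ¬ (['\n','\n'] <+: List.intercalate ['\n'] L) := by
  induction L with
  | nil => simp [List.intercalate]
  | cons a L ih =>
    cases L with
    | nil =>
      have ha := hL a (by simp)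
      rw [pv_intercalate_single]
      constructor
      · intro h
        exact ha (h.subset (by simp))
      · intro h
        exact ha (h.subset (by simp))
    | cons b L' =>
      have ha := hL a (by simp)
      have hint := pv_intercalate_cc ['\n'] a b L'
      obtain ⟨ih1, ih2⟩ := ih (fun x hx => hL x (by simp [hx]))
        ((List.isChain_cons.mp hC).2)
      constructor
      · intro h
        rw [hint, List.append_assoc] at h
        have h2 := pv_infix_skip a _ ha h
        rw [show (['\n'] ++ List.intercalate ['\n'] (b :: L'))
            = '\n' :: List.intercalate ['\n'] (b :: L') from rfl] at h2
        rw [List.infix_cons_iff] at h2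
        rcases h2 with h2 | h2
        · rw [List.cons_prefix_cons] at h2
          exact ih2 h2.2
        · exact ih1 h2
      · intro h
        rw [hint, List.append_assoc] at h
        cases ha2 : a with
        | cons c a' =>
          rw [ha2] at h
          rw [List.cons_append, List.cons_prefix_cons] at h
          have hc : c ≠ '\n' := by
            rw [ha2] at ha
            simp at ha
            exact fun hh => ha.1 hh.symm
          exact hc h.1.symm
        | nil =>
          rw [ha2] at h
          simp only [List.nil_append] at h
          rw [show (['\n'] ++ List.intercalate ['\n'] (b :: L'))
              = '\n' :: List.intercalate ['\n'] (b :: L') from rfl] at h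
          rw [List.cons_prefix_cons] at h
          have hb : b ≠ [] := by
            rw [ha2] at hC
            rcases (List.isChain_cons_cons.mp hC).1 with hh | hh
            · exact absurd rfl hh
            · exact hh
          have h3 := h.2
          have hbl := hL b (by simp)
          cases hb2 : b with
          | nil => exact hb hb2
          | cons d b' =>
            have hdne : d ≠ '\n' := by
              rw [hb2] at hbl
              simp at hbl
              exact fun hh => hbl.1 hh.symm
            cases L' with
            | nil =>
              rw [pv_intercalate_single, hb2, List.cons_prefix_cons] at h3
              exact hdne h3.1.symm
            | cons e L'' =>
              rw [pv_intercalate_cc, hb2, List.append_assoc, List.cons_append,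
                List.cons_prefix_cons] at h3
              exact hdne h3.1.symm

-- ---- per-line equivalence (Python: line.strip().split() == line.split()) ----

theorem pv_line_norm (line : String) :
    PySem.Str.join " " (PySem.Str.split₀ (PySem.Str.strip line))
      = PySem.Str.join " " (PySem.Str.split₀ line) := by
  apply String.toList_inj.mp
  rw [PySem.Str.toList_join, PySem.Str.toList_join, PySem.Str.split₀_map_toList,
    PySem.Str.split₀_map_toList, PySem.Str.toList_strip, pv_split₀_strip]

theorem pv_words (s : String) :
    ∀ w ∈ PySem.Chars.split₀ s.toList, w ≠ [] ∧ ∀ c ∈ w, ¬ PySem.Chars.isspace c :=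
  pv_go_words _ [] [] (by simp) (by simp)

theorem pv_strip_empty_iff (line : String) :
    (PySem.Str.strip line = "") ↔ (PySem.Str.join " " (PySem.Str.split₀ line) = "") := by
  rw [← String.toList_eq_nil_iff, ← String.toList_eq_nil_iff, PySem.Str.toList_strip,
    PySem.Str.toList_join, PySem.Str.split₀_map_toList, pv_strip_nil_iff,
    ← pv_split₀_nil_iff]
  show _ ↔ PySem.Chars.join " ".toList (PySem.Chars.split₀ line.toList) = []
  unfold PySem.Chars.join
  constructor
  · intro h
    rw [h]
    simp [List.intercalate]
  · intro h
    cases hsp : PySem.Chars.split₀ line.toList with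
    | nil => rfl
    | cons a ws =>
      exfalso
      have ha : a ≠ [] := (pv_words line a (by rw [hsp]; simp)).1
      rw [hsp] at h
      exact pv_join_ne_nil _ _ _ ha h

theorem pv_norm_no_nl (line : String) :
    '\n' ∉ (PySem.Str.join " " (PySem.Str.split₀ line)).toList := by
  rw [PySem.Str.toList_join, PySem.Str.split₀_map_toList]
  intro hmem
  have hm2 : '\n' ∈ List.intercalate " ".toList (PySem.Chars.split₀ line.toList) := hmem
  rcases pv_mem_intercalate _ _ _ hm2 with h | ⟨w, hw, hcw⟩
  · simp at h
  · exact (pv_words line w hw).2 '\n' hcw (by decide)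

-- ===== VERDICT (by name: the statement is the Claim_ definition above) =====
theorem clean_text_content_py_spec : Claim_equal_clean_text_content_py := by
  intro text _
  unfold Spec_clean_text_content_py
  by_cases h0 : text = ""
  · subst h0
    apply String.toList_inj.mp
    decide
  · simp only [clean_text_content_py, clean_text_content_py_alt, if_neg h0]
    set lines := (PySem.Str.split? text "\n").getD [] with hlines
    set norm := fun line => PySem.Str.join " " (PySem.Str.split₀ line) with hnorm
    -- A's fold over lines equals the fold of the normalized values
    have hAfold : lines.foldl (fun acc line =>
        let cleaned_line := PySem.Str.strip line
        if cleaned_line ≠ "" then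
          acc ++ [PySem.Str.join " " (PySem.Str.split₀ cleaned_line)]
        else if acc ≠ [] ∧ acc.getLast?.getD "" ≠ "" then acc ++ [""]
        else acc) []
        = (lines.map norm).foldl (fun acc n =>
            if n ≠ "" then acc ++ [n]
            else if acc ≠ [] ∧ acc.getLast?.getD "" ≠ "" then acc ++ [""]
            else acc) [] := by
      rw [List.foldl_map]
      congr 1
      funext acc line
      by_cases h : PySem.Str.strip line = ""
      · have h2 : norm line = "" := by rw [hnorm]; exact (pv_strip_empty_iff line).mp h
        simp only [h, h2]
        simp
      · have h2 : norm line ≠ "" := by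
          rw [hnorm]
          exact fun hh => h ((pv_strip_empty_iff line).mpr hh)
        simp only [if_pos h, if_pos h2]
        rw [pv_line_norm]
    rw [hAfold, pv_foldA, pv_foldB]
    have hdA : (decide ((([] : List String)).getLast?.getD "" ≠ "")) = false := by decide
    have hdB : (decide (([] : List String) ≠ [])) = false := by decide
    rw [hdA, hdB]
    simp only [List.nil_append]
    set ns := lines.map norm with hns
    set L := pvG false ns with hLdef
    -- the joined text contains no triple newline, so A's while-loop is the identity on it
    have hnotriple : ¬ (['\n','\n','\n'] <:+: (PySem.Str.join "\n" L).toList) := by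
      rw [PySem.Str.toList_join]
      have hjoin : PySem.Chars.join "\n".toList (L.map String.toList)
          = List.intercalate ['\n'] (L.map String.toList) := rfl
      rw [hjoin]
      refine (pv_join_noTriple _ ?_ ?_).1
      · intro x hx
        obtain ⟨w, hwL, rfl⟩ := List.mem_map.mp hx
        rcases pvG_mem false ns w hwL with rfl | hw
        · simp
        · rw [hns] at hw
          obtain ⟨line, _, rfl⟩ := List.mem_map.mp hw
          rw [hnorm]
          exact pv_norm_no_nl line
      · refine (List.isChain_map _).mpr ?_
        refine (pvG_chain false ns).imp ?_
        intro a b hab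
        rcases hab with hab | hab
        · exact Or.inl (fun hh => hab (String.toList_eq_nil_iff.mp hh))
        · exact Or.inr (fun hh => hab (String.toList_eq_nil_iff.mp hh))
    have hno : PySem.Str.isIn "\n\n\n" (PySem.Str.join "\n" L) = false := by
      rw [PySem.Str.isIn_eq]
      refine (PySem.Chars.isIn_eq_false_iff _ _).mpr ?_
      have h3 : ("\n\n\n".toList) = ['\n', '\n', '\n'] := rfl
      rw [h3]
      exact hnotriple
    have hcoll : pvCollapseNl ((PySem.Str.join "\n" L).toList.length + 1)
        (PySem.Str.join "\n" L) = PySem.Str.join "\n" L := by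
      rw [pvCollapseNl, hno]
      simp
    rw [hcoll]
    have htl : ("\r\x00\uFFFD".toList) = ['\r', '\x00', '\uFFFD'] := rfl
    rw [htl]
    simp only [List.foldl_cons, List.foldl_nil]
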